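-- pv_equiv track=rewrite | github.com/yingl/LintCodeInPython | find-google.py | FindGoogle
-- ===== SOURCE A (Python) =====
-- def FindGoogle(S):
--     # Write your code here.
--     lc = False # // 形式的注释
--     mlc = False # /* ... */ 形式的注释
--     google = ''
--     for s in S:
--       prev = None
--       for c in s:
--         if (prev == '/') and (c == '/') and (not mlc):
--           lc = True
--         elif (prev == '/') and (c == '*') and (not mlc) and (not lc):
--           mlc = True
--         elif (prev == '*') and (c == '/') and mlc:
--           mlc = False
--         elif lc or mlc:
--           if c == 'G':
--             google = 'G'
--           elif (c == 'o') and (google == 'G'):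
--             google = 'Go'
--           elif (c == 'o') and (google == 'Go'):
--             google = 'Goo'
--           elif (c == 'g') and (google == 'Goo'):
--             google = 'Goog'
--           elif (c == 'l') and (google == 'Goog'):
--             google = 'Googl'
--           elif (c == 'e') and (google == 'Googl'):
--             return True
--           else:
--             google = ''
--         prev = c
--       lc = False
--     return False
-- ===== SOURCE B (Python) =====
-- def FindGoogle(S):
--     # Extract comment content into a buffer, then do one substring search.
--     lc = False
--     mlc = False
--     buf = []
--     for s in S:
--         prev = None
--         for c in s:
--             if (prev == '/') and (c == '/') and (not mlc):
--                 lc = True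
--             elif (prev == '/') and (c == '*') and (not mlc) and (not lc):
--                 mlc = True
--             elif (prev == '*') and (c == '/') and mlc:
--                 mlc = False
--             elif lc or mlc:
--                 buf.append(c)
--             prev = c
--         lc = False
--     return 'Google' in ''.join(buf)
-- ===== Notes on version B (the rewrite author's own statement) =====
-- stated objective: simpler
-- what changed: Replaces A's fused hand-written character-by-character 'Google' matcher with a two-phase decomposition: the comment state machine only extracts in-comment characters into a buffer, and a single substring search ('Google' in buffer) at the end replaces the six-branch incremental matcher.
import Mathlib
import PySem

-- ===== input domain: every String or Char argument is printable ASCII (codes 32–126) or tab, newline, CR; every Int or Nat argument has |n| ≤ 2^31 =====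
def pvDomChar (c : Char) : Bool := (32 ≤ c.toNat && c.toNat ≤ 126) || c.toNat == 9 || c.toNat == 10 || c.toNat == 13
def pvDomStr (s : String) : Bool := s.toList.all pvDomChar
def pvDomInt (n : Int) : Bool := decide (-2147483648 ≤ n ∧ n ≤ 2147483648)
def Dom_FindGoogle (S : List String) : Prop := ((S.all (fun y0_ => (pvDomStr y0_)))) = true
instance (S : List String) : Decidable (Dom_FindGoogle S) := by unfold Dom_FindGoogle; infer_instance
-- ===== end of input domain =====

-- B splits A's fused pass: the comment state machine only extracts in-comment characters
-- into a buffer, and one final substring search replaces A's hand-written 'Google' matcher (objective: simpler).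


-- ===== PORT A =====
-- inner loop of A: state (prev, lc, mlc, google); `.inl ()` = the early `return True`
def FindGoogleLineA : Option Char → Bool → Bool → List Char → List Char → Sum Unit (Bool × Bool × List Char)
  | _, lc, mlc, google, [] => .inr (lc, mlc, google)
  | prev, lc, mlc, google, c :: rest =>
    if prev = some '/' ∧ c = '/' ∧ mlc = false then
      FindGoogleLineA (some c) true mlc google rest
    else if prev = some '/' ∧ c = '*' ∧ mlc = false ∧ lc = false then
      FindGoogleLineA (some c) lc true google rest
    else if prev = some '*' ∧ c = '/' ∧ mlc = true then
      FindGoogleLineA (some c) lc false google rest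
    else if lc || mlc then
      if c = 'G' then FindGoogleLineA (some c) lc mlc ['G'] rest
      else if c = 'o' ∧ google = ['G'] then FindGoogleLineA (some c) lc mlc ['G', 'o'] rest
      else if c = 'o' ∧ google = ['G', 'o'] then FindGoogleLineA (some c) lc mlc ['G', 'o', 'o'] rest
      else if c = 'g' ∧ google = ['G', 'o', 'o'] then FindGoogleLineA (some c) lc mlc ['G', 'o', 'o', 'g'] rest
      else if c = 'l' ∧ google = ['G', 'o', 'o', 'g'] then FindGoogleLineA (some c) lc mlc ['G', 'o', 'o', 'g', 'l'] rest
      else if c = 'e' ∧ google = ['G', 'o', 'o', 'g', 'l'] then .inl ()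
      else FindGoogleLineA (some c) lc mlc [] rest
    else FindGoogleLineA (some c) lc mlc google rest

-- outer loop of A: lc is reset to false after each line, mlc and google persist
def FindGoogleLinesA : Bool → Bool → List Char → List String → Bool
  | _, _, _, [] => false
  | lc, mlc, google, s :: rest =>
    match FindGoogleLineA none lc mlc google s.toList with
    | .inl _ => true
    | .inr (_, mlc', google') => FindGoogleLinesA false mlc' google' rest

def FindGoogle (S : List String) : Bool := FindGoogleLinesA false false [] S

-- ===== PORT B =====
-- inner loop of B: same comment state machine, but in-comment characters go to the buffer
def FindGoogleLineB : Option Char → Bool → Bool → List Char → List Char → Bool × Bool × List Char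
  | _, lc, mlc, buf, [] => (lc, mlc, buf)
  | prev, lc, mlc, buf, c :: rest =>
    if prev = some '/' ∧ c = '/' ∧ mlc = false then
      FindGoogleLineB (some c) true mlc buf rest
    else if prev = some '/' ∧ c = '*' ∧ mlc = false ∧ lc = false then
      FindGoogleLineB (some c) lc true buf rest
    else if prev = some '*' ∧ c = '/' ∧ mlc = true then
      FindGoogleLineB (some c) lc false buf rest
    else if lc || mlc then
      FindGoogleLineB (some c) lc mlc (buf ++ [c]) rest
    else
      FindGoogleLineB (some c) lc mlc buf rest

def FindGoogleLinesB : Bool → Bool → List Char → List String → List Char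
  | _, _, buf, [] => buf
  | lc, mlc, buf, s :: rest =>
    match FindGoogleLineB none lc mlc buf s.toList with
    | (_, mlc', buf') => FindGoogleLinesB false mlc' buf' rest

-- `'Google' in buffer`
def FindGoogle_alt (S : List String) : Bool :=
  PySem.Chars.isIn ['G', 'o', 'o', 'g', 'l', 'e'] (FindGoogleLinesB false false [] S)

-- ===== PRECONDITION & SPEC =====
def Spec_FindGoogle (S : List String) (out : Bool) : Prop := out = FindGoogle_alt S
instance (S : List String) (out : Bool) : Decidable (Spec_FindGoogle S out) := by unfold Spec_FindGoogle; infer_instance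

-- ===== CLAIM (what is proved, stated in full; the proofs are below) =====
def Claim_equal_FindGoogle : Prop := ∀ (S : List String), Dom_FindGoogle S → Spec_FindGoogle S (FindGoogle S)

-- ===== LEMMAS AND PROOFS =====

-- the pattern
def pvP : List Char := ['G', 'o', 'o', 'g', 'l', 'e']

-- A's matcher, abstracted: next google state on a non-returning in-comment character
def pvStep (g : List Char) (c : Char) : List Char :=
  if c = 'G' then ['G']
  else if c = 'o' ∧ g = ['G'] then ['G', 'o']
  else if c = 'o' ∧ g = ['G', 'o'] then ['G', 'o', 'o']
  else if c = 'g' ∧ g = ['G', 'o', 'o'] then ['G', 'o', 'o', 'g']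
  else if c = 'l' ∧ g = ['G', 'o', 'o', 'g'] then ['G', 'o', 'o', 'g', 'l']
  else []

-- A's matcher run over a bare character stream
def pvRunM : List Char → List Char → Bool
  | _, [] => false
  | g, c :: t => if c = 'e' ∧ g = ['G', 'o', 'o', 'g', 'l'] then true else pvRunM (pvStep g c) t

def pvStates : List (List Char) :=
  [[], ['G'], ['G', 'o'], ['G', 'o', 'o'], ['G', 'o', 'o', 'g'], ['G', 'o', 'o', 'g', 'l']]

lemma pvStep_mem (g : List Char) (c : Char) : pvStep g c ∈ pvStates := by
  unfold pvStep pvStates; split_ifs <;> simp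

-- core: A's naive matcher from a reachable state equals substring search
set_option maxRecDepth 8192 in
set_option maxHeartbeats 1000000 in
lemma pvRunM_infix (t : List Char) (g : List Char) (hg : g ∈ pvStates) :
    pvRunM g t = true ↔ pvP <:+: (g ++ t) := by
  induction t generalizing g with
  | nil =>
    simp only [pvRunM, List.append_nil]
    constructor
    · intro h; cases h
    · intro h
      have := h.length_le
      fin_cases hg <;> simp [pvP] at this
  | cons c t ih =>
    by_cases hs : c = 'e' ∧ g = ['G', 'o', 'o', 'g', 'l']
    · obtain ⟨rfl, rfl⟩ := hs
      constructor
      · intro _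
        refine ⟨[], t, ?_⟩; simp [pvP]
      · intro _
        simp [pvRunM]
    · rw [show pvRunM g (c :: t) = pvRunM (pvStep g c) t from by
          simp only [pvRunM, if_neg hs]]
      rw [ih (pvStep g c) (pvStep_mem g c)]
      fin_cases hg <;>
        (rcases eq_or_ne c 'G' with rfl | h1
         · simp [pvStep, pvP, List.infix_cons_iff, List.cons_prefix_cons]
         rcases eq_or_ne c 'o' with rfl | h2
         · simp [pvStep, pvP, List.infix_cons_iff, List.cons_prefix_cons]
         rcases eq_or_ne c 'g' with rfl | h3
         · simp [pvStep, pvP, List.infix_cons_iff, List.cons_prefix_cons]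
         rcases eq_or_ne c 'l' with rfl | h4
         · simp [pvStep, pvP, List.infix_cons_iff, List.cons_prefix_cons]
         rcases eq_or_ne c 'e' with rfl | h5
         · first
           | exact absurd ⟨rfl, rfl⟩ hs
           | simp [pvStep, pvP, List.infix_cons_iff, List.cons_prefix_cons]
         · simp [pvStep, pvP, List.infix_cons_iff, List.cons_prefix_cons, h1, h2, h3, h4,
             h1.symm, h2.symm, h3.symm, h4.symm, h5.symm])

-- buffer invariant tying A's state to B's buffer
def pvInv (g buf : List Char) : Prop :=
  ∀ t, pvRunM g t = true ↔ pvP <:+: (buf ++ t)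

lemma pvInv_step {g buf : List Char} (h : pvInv g buf) (c : Char)
    (hns : ¬ (c = 'e' ∧ g = ['G', 'o', 'o', 'g', 'l'])) :
    pvInv (pvStep g c) (buf ++ [c]) := by
  intro t
  have := h (c :: t)
  simp only [pvRunM, if_neg hns] at this
  simpa [List.append_assoc] using this

lemma pvInv_succ {g buf : List Char} (h : pvInv g buf) (c : Char)
    (hs : c = 'e' ∧ g = ['G', 'o', 'o', 'g', 'l']) :
    pvP <:+: (buf ++ [c]) := by
  have := (h [c]).mp (by simp [pvRunM, if_pos hs])
  exact this

lemma pvInv_init : pvInv [] [] := by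
  intro t
  simpa using pvRunM_infix t [] (by simp [pvStates])

-- B's buffer only grows
lemma lineB_buf_prefix (cs : List Char) (prev : Option Char) (lc mlc : Bool) (buf : List Char) :
    buf <+: (FindGoogleLineB prev lc mlc buf cs).2.2 := by
  induction cs generalizing prev lc mlc buf with
  | nil => simp [FindGoogleLineB]
  | cons c rest ih =>
    simp only [FindGoogleLineB]
    split_ifs <;>
      first
        | exact ih _ _ _ _
        | exact (List.prefix_append buf [c]).trans (ih _ _ _ _)

lemma linesB_buf_prefix (ls : List String) (lc mlc : Bool) (buf : List Char) :
    buf <+: FindGoogleLinesB lc mlc buf ls := by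
  induction ls generalizing lc mlc buf with
  | nil => simp [FindGoogleLinesB]
  | cons s rest ih =>
    simp only [FindGoogleLinesB]
    exact (lineB_buf_prefix s.toList none lc mlc buf).trans (ih _ _ _)

-- relation between A's inner-loop result and B's inner-loop result
def pvAgree : Sum Unit (Bool × Bool × List Char) → (Bool × Bool × List Char) → Prop
  | .inl _, r => pvP <:+: r.2.2
  | .inr a, r => r.1 = a.1 ∧ r.2.1 = a.2.1 ∧ pvInv a.2.2 r.2.2

-- one line: A's inner loop vs B's inner loop
lemma lineAB (cs : List Char) (prev : Option Char) (lc mlc : Bool) (g buf : List Char)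
    (h : pvInv g buf) :
    pvAgree (FindGoogleLineA prev lc mlc g cs) (FindGoogleLineB prev lc mlc buf cs) := by
  induction cs generalizing prev lc mlc g buf with
  | nil => exact ⟨rfl, rfl, h⟩
  | cons c rest ih =>
    simp only [FindGoogleLineA, FindGoogleLineB]
    split_ifs with h1 h2 h3 h4 h5 h6 h7 h8 h9 h10
    · exact ih _ _ _ _ _ h
    · exact ih _ _ _ _ _ h
    · exact ih _ _ _ _ _ h
    · -- c = 'G'
      refine ih _ _ _ _ _ ?_
      have hst := pvInv_step h c (by simp [h5])
      rwa [show pvStep g c = ['G'] from by simp [pvStep, h5]] at hst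
    · -- c = 'o', google = ['G']
      refine ih _ _ _ _ _ ?_
      have hst := pvInv_step h c (by simp [h6.1])
      rwa [show pvStep g c = ['G', 'o'] from by simp [pvStep, h6.1, h6.2]] at hst
    · -- c = 'o', google = ['G', 'o']
      refine ih _ _ _ _ _ ?_
      have hst := pvInv_step h c (by simp [h7.1])
      rwa [show pvStep g c = ['G', 'o', 'o'] from by simp [pvStep, h7.1, h7.2]] at hst
    · -- c = 'g', google = ['G', 'o', 'o']
      refine ih _ _ _ _ _ ?_
      have hst := pvInv_step h c (by simp [h8.1])
      rwa [show pvStep g c = ['G', 'o', 'o', 'g'] from by simp [pvStep, h8.1, h8.2]] at hst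
    · -- c = 'l', google = ['G', 'o', 'o', 'g']
      refine ih _ _ _ _ _ ?_
      have hst := pvInv_step h c (by simp [h9.1])
      rwa [show pvStep g c = ['G', 'o', 'o', 'g', 'l'] from by
            simp [pvStep, h9.1, h9.2]] at hst
    · -- success: A returns True; B's buffer already contains the pattern and only grows
      show pvP <:+: (FindGoogleLineB (some c) lc mlc (buf ++ [c]) rest).2.2
      exact (pvInv_succ h c h10).trans
        (lineB_buf_prefix rest (some c) lc mlc (buf ++ [c])).isInfix
    · -- in-comment character matching nothing: google resets to []
      refine ih _ _ _ _ _ ?_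
      have hst := pvInv_step h c h10
      rwa [show pvStep g c = [] from by simp [pvStep, h5, h6, h7, h8, h9]] at hst
    · exact ih _ _ _ _ _ h

-- all lines
lemma linesAB (ls : List String) (lc mlc : Bool) (g buf : List Char) (h : pvInv g buf) :
    FindGoogleLinesA lc mlc g ls = PySem.Chars.isIn pvP (FindGoogleLinesB lc mlc buf ls) := by
  induction ls generalizing lc mlc g buf with
  | nil =>
    have : ¬ pvP <:+: buf := by
      intro hin
      have := (h []).mpr (by simpa using hin)
      simp [pvRunM] at this
    simp only [FindGoogleLinesA, FindGoogleLinesB]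
    exact ((PySem.Chars.isIn_eq_false_iff _ _).mpr this).symm
  | cons s rest ih =>
    have hl := lineAB s.toList none lc mlc g buf h
    rcases hB : FindGoogleLineB none lc mlc buf s.toList with ⟨lc2, mlc2, buf'⟩
    rw [hB] at hl
    cases hA : FindGoogleLineA none lc mlc g s.toList with
    | inl u =>
      rw [hA] at hl
      simp only [FindGoogleLinesA, FindGoogleLinesB, hA, hB]
      have hmono : pvP <:+: FindGoogleLinesB false mlc2 buf' rest :=
        (hl : pvP <:+: buf').trans (linesB_buf_prefix rest false mlc2 buf').isInfix
      exact ((PySem.Chars.isIn_iff_infix _ _).mpr hmono).symm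
    | inr r =>
      obtain ⟨lc', mlc', g'⟩ := r
      rw [hA] at hl
      obtain ⟨-, e2, hInv⟩ := hl
      simp only at e2 hInv
      simp only [FindGoogleLinesA, FindGoogleLinesB, hA, hB]
      rw [e2]
      exact ih false mlc' g' buf' hInv

-- ===== VERDICT (by name: the statement is the Claim_ definition above) =====
theorem FindGoogle_spec : Claim_equal_FindGoogle := by
  intro S _
  unfold Spec_FindGoogle FindGoogle FindGoogle_alt
  exact linesAB S false false [] [] pvInv_init
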